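-- pv_equiv track=rewrite | github.com/Benjamincollins42/various_mini_tasks_for_job_aps | generic/python_basics.py | check_number_anagram
-- ===== SOURCE A (Python) =====
-- def check_number_anagram(integer):
--     """
--     Write a function that gets an integer number as input and returns a boolean
--     type True or False based on whether the number when read backwards gives
--     the same number. This would be the equivalent of an anagram with strings.
--     E.g. input of number 1234321 would return True.
--     """
--
--     flag = True
--
--     # write you code here
--
--     # this is just checking for palindromes not anagrams
--     # '112' and '121' are anagrams of each other but only '121' is a palindrome
--
--     integer = str(integer)
--     flipped = ''
--
--     for i in range(len(integer)):
--
--         flipped += integer[-i - 1]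
--
--     flag = flipped == integer
--
--     # also works with strings
--
--     return flag
-- ===== SOURCE B (Python) =====
-- def check_number_anagram(integer):
--     s = str(integer)
--     n = len(s)
--     for i in range(n // 2):
--         if s[i] != s[n - 1 - i]:
--             return False
--     return True
-- ===== Notes on version B (the rewrite author's own statement) =====
-- stated objective: simpler
-- what changed: B replaces A's build-a-reversed-copy-then-compare loop with an early-exit two-pointer scan comparing s[i] with s[n-1-i] over only the first half of the digit string.
import Mathlib
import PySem

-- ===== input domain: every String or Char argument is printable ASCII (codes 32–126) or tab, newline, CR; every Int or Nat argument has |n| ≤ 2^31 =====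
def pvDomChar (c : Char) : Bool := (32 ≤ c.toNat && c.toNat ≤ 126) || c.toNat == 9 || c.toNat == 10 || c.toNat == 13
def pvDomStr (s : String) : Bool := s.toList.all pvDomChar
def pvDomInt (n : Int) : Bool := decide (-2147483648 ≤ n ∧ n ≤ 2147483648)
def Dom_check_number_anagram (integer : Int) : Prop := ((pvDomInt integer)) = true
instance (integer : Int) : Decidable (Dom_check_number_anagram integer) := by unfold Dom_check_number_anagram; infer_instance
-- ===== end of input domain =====

-- B replaces A's reversed-copy construction by an early-exit two-pointer scan over the first half (objective: simpler).

-- ===== PORT A =====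
-- A: s = str(integer); flipped = ''; for i in range(len(s)): flipped += s[-i-1]; return flipped == s
-- s[-i-1] is always in range for i in range(len(s)), so pyGetD's default ' ' is never produced.
def check_number_anagram (integer : Int) : Bool :=
  let s := PySem.Int.toChars integer
  let flipped := (PySem.List.pyRange 0 (s.length : Int) 1).foldl
      (fun acc i => acc ++ [PySem.List.pyGetD s (-i - 1) ' ']) ([] : List Char)
  flipped == s

-- ===== PORT B =====
-- B: for i in range(n // 2): if s[i] != s[n-1-i]: return False; return True
-- the loop is the structural recursion over the index list range(n//2); indices are
-- always in range, so the getElem? options compare exactly as Python's characters do.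
def pvScan (s : List Char) : List Nat → Bool
  | [] => true
  | i :: rest => if s[i]? ≠ s[s.length - 1 - i]? then false else pvScan s rest

def check_number_anagram_alt (integer : Int) : Bool :=
  let s := PySem.Int.toChars integer
  pvScan s (List.range (s.length / 2))

-- ===== PRECONDITION & SPEC =====
def Spec_check_number_anagram (integer : Int) (out : Bool) : Prop := out = check_number_anagram_alt integer
instance (integer : Int) (out : Bool) : Decidable (Spec_check_number_anagram integer out) := by unfold Spec_check_number_anagram; infer_instance

-- ===== CLAIM (what is proved, stated in full; the proofs are below) =====
def Claim_equal_check_number_anagram : Prop := ∀ (integer : Int), Dom_check_number_anagram integer → Spec_check_number_anagram integer (check_number_anagram integer)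

-- ===== LEMMAS AND PROOFS =====

-- A's loop builds exactly s.reverse
lemma pvFlipped_eq_reverse (s : List Char) :
    (PySem.List.pyRange 0 (s.length : Int) 1).foldl
      (fun acc i => acc ++ [PySem.List.pyGetD s (-i - 1) ' ']) ([] : List Char) = s.reverse := by
  rw [PySem.List.foldl_append_singleton_eq_map, PySem.List.pyRange_one]
  simp only [Int.sub_zero, Int.toNat_natCast, List.map_map, List.nil_append]
  apply List.ext_getElem
  · simp
  · intro j h1 h2
    simp only [List.getElem_map, List.getElem_range, Function.comp_apply, List.getElem_reverse]
    have hj : j < s.length := by simpa using h1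
    rw [show (0 : Int) + (j : Int) = (j : Int) by ring]
    rw [show -(j : Int) - 1 = -(((j + 1 : Nat)) : Int) by push_cast; ring]
    rw [PySem.List.pyGetD_neg_natCast s (j+1) ' ' (by omega) (by omega)]
    congr 1
    omega

-- B's scan over a list of indices decides the pointwise condition
lemma pvScan_eq (s : List Char) (l : List Nat) :
    pvScan s l = decide (∀ j ∈ l, s[j]? = s[s.length - 1 - j]?) := by
  induction l with
  | nil => simp [pvScan]
  | cons i rest ih =>
    rw [pvScan]
    by_cases hc : s[i]? = s[s.length - 1 - i]?
    · rw [if_neg (by simpa using hc), ih]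
      simp [hc]
    · rw [if_pos (by simpa using hc)]
      symm
      simp only [decide_eq_false_iff_not]
      intro hall
      exact hc (hall i (by simp))

-- palindrome characterisation
lemma pvReverse_iff (s : List Char) :
    s.reverse = s ↔ (∀ j < s.length / 2, s[j]? = s[s.length - 1 - j]?) := by
  constructor
  · intro hrev j hj
    conv_lhs => rw [← hrev]
    rw [List.getElem?_eq_getElem (by simp; omega), List.getElem?_eq_getElem (by omega)]
    simp [List.getElem_reverse]
  · intro hall
    apply List.ext_getElem (by simp)
    intro j h1 h2
    rw [List.getElem_reverse]
    by_cases hc : j < s.length / 2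
    · have := hall j hc
      rw [List.getElem?_eq_getElem (by omega), List.getElem?_eq_getElem (by omega)] at this
      simpa using this.symm
    · by_cases hm : s.length - 1 - j < s.length / 2
      · have := hall _ hm
        rw [List.getElem?_eq_getElem (by omega), List.getElem?_eq_getElem (by omega)] at this
        have h3 : s.length - 1 - (s.length - 1 - j) = j := by omega
        simp only [h3] at this
        simpa using this
      · congr 1
        omega

-- ===== VERDICT (by name: the statement is the Claim_ definition above) =====
theorem check_number_anagram_spec : Claim_equal_check_number_anagram := by
  intro n _
  unfold Spec_check_number_anagram check_number_anagram check_number_anagram_alt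
  simp only [pvFlipped_eq_reverse, pvScan_eq]
  set s := PySem.Int.toChars n
  rw [Bool.eq_iff_iff]
  simp only [beq_iff_eq, decide_eq_true_eq, pvReverse_iff, List.mem_range]
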